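-- pv_equiv track=rewrite | github.com/troyfeng116/prob-stats-scripts | src/other/bertrand_ballot.py | bertrand_ballot_dp
-- ===== SOURCE A (Python) =====
-- def bertrand_ballot_dp(n: int, m: int) -> int:
--     if n < m:
--         raise ValueError(f"n={n} votes for A cannot be less than m={m} votes for B")
--
--     # dp[a][b] = num paths starting from a votes for A, b votes for B
--     opt = [[0 for _ in range(m + 1)] for _ in range(n + 1)]
--     for a in range(n, -1, -1):
--         # must have a >= b
--         for b in range(min(a, m), -1, -1):
--             if a == n:
--                 opt[a][b] = 1
--             else:
--                 opt[a][b] += opt[a + 1][b]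
--                 if b + 1 <= m and b + 1 <= a:
--                     opt[a][b] += opt[a][b + 1]
--     return opt[0][0]
-- ===== SOURCE B (Python) =====
-- def _comb(N, k):
--     # binomial coefficient, 0 outside 0 <= k <= N; exact integer arithmetic
--     if k < 0 or k > N:
--         return 0
--     num = 1
--     den = 1
--     for i in range(k):
--         num *= N - i
--         den *= i + 1
--     return num // den
--
--
-- def bertrand_ballot_dp(n: int, m: int) -> int:
--     if n < m:
--         raise ValueError(f"n={n} votes for A cannot be less than m={m} votes for B")
--     # ballot-problem closed form: C(n+m, m) - C(n+m, m-1)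
--     return _comb(n + m, m) - _comb(n + m, m - 1)
-- ===== Notes on version B (the rewrite author's own statement) =====
-- stated objective: faster
-- what changed: Replaced the O(n*m) bottom-up DP table with the ballot-problem closed form C(n+m,m) - C(n+m,m-1), computed by a single O(m) multiplicative binomial loop.
import Mathlib
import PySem

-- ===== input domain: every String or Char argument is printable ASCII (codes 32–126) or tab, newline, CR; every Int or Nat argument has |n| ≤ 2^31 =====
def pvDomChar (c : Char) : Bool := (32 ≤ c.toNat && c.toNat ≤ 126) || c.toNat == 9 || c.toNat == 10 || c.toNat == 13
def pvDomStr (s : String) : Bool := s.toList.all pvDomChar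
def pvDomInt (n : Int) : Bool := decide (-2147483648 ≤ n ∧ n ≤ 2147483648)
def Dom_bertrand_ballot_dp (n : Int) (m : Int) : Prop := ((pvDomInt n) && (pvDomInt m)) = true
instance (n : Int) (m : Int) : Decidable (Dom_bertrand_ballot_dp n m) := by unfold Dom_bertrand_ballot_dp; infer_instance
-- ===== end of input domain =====

-- B replaces A's O(n*m) table fill by the ballot-number closed form C(n+m,m) - C(n+m,m-1) (one O(m) product); equivalence proved on 0 ≤ m ≤ n (elsewhere A raises).

-- ===== PORT A =====
-- opt[a][b] read (in-range under Pre_): Python raises on out-of-range, which never happens on admitted inputs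
def pvTGet (t : List (List Int)) (a b : Int) : Int :=
  PySem.List.pyGetD (PySem.List.pyGetD t a []) b 0

-- opt[a][b] = v assignment; all writes are in range on admitted inputs (Python would raise otherwise)
def pvTSet (t : List (List Int)) (a b : Int) (v : Int) : List (List Int) :=
  if a < 0 then t
  else t.set a.toNat (if b < 0 then t.getD a.toNat [] else (t.getD a.toNat []).set b.toNat v)

-- body of the inner 'for b' loop of A
def pvInnerStep (n m a : Int) (t : List (List Int)) (b : Int) : List (List Int) :=
  if a = n then pvTSet t a b 1
  else
    let t1 := pvTSet t a b (pvTGet t a b + pvTGet t (a + 1) b)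
    if b + 1 ≤ m ∧ b + 1 ≤ a then pvTSet t1 a b (pvTGet t1 a b + pvTGet t1 a (b + 1)) else t1

def bertrand_ballot_dp (n : Int) (m : Int) : Int :=
  if n < m then 0  -- Python raises ValueError here; excluded by Pre_
  else
    let opt0 := (PySem.List.pyRange 0 (n + 1) 1).map
      (fun _ => (PySem.List.pyRange 0 (m + 1) 1).map (fun _ => (0 : Int)))
    let opt := (PySem.List.pyRange n (-1) (-1)).foldl
      (fun t a => (PySem.List.pyRange (min a m) (-1) (-1)).foldl (pvInnerStep n m a) t) opt0
    pvTGet opt 0 0  -- opt[0][0] (raises when m < 0 or n < 0; excluded by Pre_)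

-- ===== PORT B =====
-- _comb of Source B: multiplicative loop, exact integer division at the end
def pvComb (N k : Int) : Int :=
  if k < 0 ∨ N < k then 0
  else
    let p := (PySem.List.pyRange 0 k 1).foldl
      (fun (s : Int × Int) i => (s.1 * (N - i), s.2 * (i + 1))) (1, 1)
    PySem.Int.floordiv p.1 p.2

def bertrand_ballot_dp_alt (n : Int) (m : Int) : Int :=
  if n < m then 0  -- Python raises ValueError here; excluded by Pre_
  else pvComb (n + m) m - pvComb (n + m) (m - 1)

-- ===== PRECONDITION & SPEC =====
-- Pre_: exactly the inputs where A returns (n < m raises ValueError; m < 0 raises IndexError at opt[0][0])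
def Pre_bertrand_ballot_dp (n : Int) (m : Int) : Prop := 0 ≤ m ∧ m ≤ n
instance (n : Int) (m : Int) : Decidable (Pre_bertrand_ballot_dp n m) := by unfold Pre_bertrand_ballot_dp; infer_instance
def pvWitness_bertrand_ballot_dp : Int × Int := (3, 2)

def Spec_bertrand_ballot_dp (n : Int) (m : Int) (out : Int) : Prop := out = bertrand_ballot_dp_alt n m
instance (n : Int) (m : Int) (out : Int) : Decidable (Spec_bertrand_ballot_dp n m out) := by unfold Spec_bertrand_ballot_dp; infer_instance

-- ===== CLAIM (what is proved, stated in full; the proofs are below) =====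
def Claim_equal_bertrand_ballot_dp : Prop := ∀ (n : Int) (m : Int), Dom_bertrand_ballot_dp n m → Pre_bertrand_ballot_dp n m → Spec_bertrand_ballot_dp n m (bertrand_ballot_dp n m)

-- ===== LEMMAS AND PROOFS =====

-- choose with an Int lower index (0 for negative)
def pvChooseZ (N : Nat) (k : Int) : Int := if k < 0 then 0 else (N.choose k.toNat : Int)

-- the closed form of A's table entry opt[a][b] (reflection principle)
def pvF (Nn Mm a b : Nat) : Int :=
  pvChooseZ ((Nn - a) + (Mm - b)) ((Mm : Int) - b) - pvChooseZ ((Nn - a) + (Mm - b)) ((Mm : Int) - a - 1)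

theorem pvChooseZ_pascal (N : Nat) (k : Int) :
    pvChooseZ (N + 1) k = pvChooseZ N k + pvChooseZ N (k - 1) := by
  unfold pvChooseZ
  rcases lt_trichotomy k 0 with h | h | h
  · rw [if_pos h, if_pos h, if_pos (by omega)]; ring
  · subst h; norm_num
  · rw [if_neg (by omega), if_neg (by omega), if_neg (by omega)]
    have hk : k.toNat = (k - 1).toNat + 1 := by omega
    rw [hk, Nat.choose_succ_succ]
    push_cast; ring

-- getD/set basics

theorem pvComb_fold (N : Nat) (K : Nat) (h : K ≤ N) :
    List.foldl (fun (s : Int × Int) i => (s.1 * ((N:Int) - i), s.2 * (i + 1))) (1, 1)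
      (List.map (fun j : Nat => (0:Int) + (j:Int)) (List.range K))
    = ((N.descFactorial K : Int), (K.factorial : Int)) := by
  induction K with
  | zero => simp
  | succ K ih =>
    rw [List.range_succ, List.map_append, List.foldl_append, ih (by omega)]
    simp [Nat.descFactorial_succ, Nat.factorial_succ]
    constructor
    · have : ((N:Int) - K) = ((N - K : Nat) : Int) := by omega
      rw [this]; ring
    · ring

theorem pvComb_eq (N k : Int) (hN : 0 ≤ N) : pvComb N k = pvChooseZ N.toNat k := by
  unfold pvComb pvChooseZ
  by_cases hk : k < 0
  · rw [if_pos (Or.inl hk), if_pos hk]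
  · rw [if_neg hk]
    by_cases hNk : N < k
    · rw [if_pos (Or.inr hNk)]
      rw [Nat.choose_eq_zero_of_lt (by omega)]; simp
    · rw [if_neg (by tauto)]
      obtain ⟨Nn, rfl⟩ : ∃ Nn : Nat, N = (Nn : Int) := ⟨N.toNat, by omega⟩
      rw [PySem.List.pyRange_one]
      simp only [sub_zero, Int.toNat_natCast]
      rw [pvComb_fold Nn k.toNat (by omega)]
      rw [PySem.Int.floordiv_natCast]
      rw [← Nat.choose_eq_descFactorial_div_factorial]

theorem getD_set_self {α : Type} (l : List α) (i : Nat) (x : α) (d : α) (h : i < l.length) :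
    (l.set i x).getD i d = x := by
  simp [List.getD, h]

theorem getD_set_ne {α : Type} (l : List α) (i j : Nat) (x : α) (d : α) (h : i ≠ j) :
    (l.set i x).getD j d = l.getD j d := by
  simp [List.getD, List.getElem?_set_ne h]

-- cast forms

theorem pvTGet_cast (t : List (List Int)) (a b : Nat) :
    pvTGet t (a : Int) (b : Int) = (t.getD a []).getD b 0 := by
  simp [pvTGet, PySem.List.pyGetD_natCast]

theorem pvTSet_cast (t : List (List Int)) (a b : Nat) (v : Int) :
    pvTSet t (a : Int) (b : Int) v = t.set a ((t.getD a []).set b v) := by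
  unfold pvTSet
  rw [if_neg (by omega), if_neg (by omega)]
  simp

-- pvF facts

theorem pvF_base (Nn Mm b : Nat) (hMN : Mm ≤ Nn) (hb : b ≤ Mm) : pvF Nn Mm Nn b = 1 := by
  unfold pvF pvChooseZ
  rw [if_neg (by omega), if_pos (by omega)]
  have h1 : ((Mm : Int) - b).toNat = Mm - b := by omega
  have h2 : Nn - Nn + (Mm - b) = Mm - b := by omega
  rw [h1, h2, Nat.choose_self]
  norm_num

theorem pvF_R2_top (Nn Mm a : Nat) (hMa : Mm ≤ a) (_ha : a < Nn) :
    pvF Nn Mm a Mm = pvF Nn Mm (a + 1) Mm := by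
  unfold pvF pvChooseZ
  rw [if_neg (by omega), if_pos (by omega), if_neg (by omega), if_pos (by omega)]
  norm_num

theorem pvF_R2_diag (Nn Mm a : Nat) (ha : a < Nn) (haM : a < Mm) :
    pvF Nn Mm a a = pvF Nn Mm (a + 1) a := by
  have hS1 : Nn - a + (Mm - a) = (Nn - (a+1) + (Mm - a)) + 1 := by omega
  have hS2 : Nn - (a+1) + (Mm - a) = (Nn - (a+1) + (Mm - a) - 1) + 1 := by omega
  set S := Nn - (a+1) + (Mm - a) - 1 with hS
  unfold pvF
  rw [hS1, hS2, pvChooseZ_pascal, pvChooseZ_pascal (S+1), pvChooseZ_pascal, pvChooseZ_pascal]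
  have e1 : (Mm : Int) - a - 1 - 1 = (Mm : Int) - (a+1:Nat) - 1 := by push_cast; ring
  rw [e1]
  ring

theorem pvF_R1 (Nn Mm a b : Nat) (ha : a < Nn) (hb1 : b + 1 ≤ Mm) (_hb2 : b + 1 ≤ a) :
    pvF Nn Mm a b = pvF Nn Mm (a + 1) b + pvF Nn Mm a (b + 1) := by
  have hS1 : Nn - a + (Mm - b) = (Nn - (a+1) + (Mm - b)) + 1 := by omega
  have hS2 : Nn - a + (Mm - (b+1)) = Nn - (a+1) + (Mm - b) := by omega
  unfold pvF
  rw [hS1, hS2, pvChooseZ_pascal, pvChooseZ_pascal]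
  have e1 : (Mm : Int) - (b+1:Nat) = (Mm : Int) - b - 1 := by push_cast; ring
  have e2 : (Mm : Int) - (a+1:Nat) - 1 = (Mm : Int) - a - 1 - 1 := by push_cast; ring
  rw [e1, e2]
  ring

def pvShape (Nn Mm : Nat) (t : List (List Int)) : Prop :=
  t.length = Nn + 1 ∧ ∀ i : Nat, i ≤ Nn → (t.getD i []).length = Mm + 1

def pvJInv (Nn Mm a lo : Nat) (t : List (List Int)) : Prop :=
  pvShape Nn Mm t ∧
  (∀ a' b : Nat, a < a' → a' ≤ Nn → b ≤ min a' Mm → pvTGet t (a' : Int) (b : Int) = pvF Nn Mm a' b) ∧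
  (∀ a' b : Nat, a' < a → b ≤ Mm → pvTGet t (a' : Int) (b : Int) = 0) ∧
  (∀ b : Nat, lo ≤ b → b ≤ min a Mm → pvTGet t (a : Int) (b : Int) = pvF Nn Mm a b) ∧
  (∀ b : Nat, b < lo → b ≤ Mm → pvTGet t (a : Int) (b : Int) = 0)

def pvInv (Nn Mm a0 : Nat) (t : List (List Int)) : Prop :=
  pvShape Nn Mm t ∧
  (∀ a b : Nat, a0 ≤ a → a ≤ Nn → b ≤ min a Mm → pvTGet t (a : Int) (b : Int) = pvF Nn Mm a b) ∧
  (∀ a b : Nat, a < a0 → b ≤ Mm → pvTGet t (a : Int) (b : Int) = 0)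

theorem tget_tset_self (Nn Mm : Nat) (t : List (List Int)) (hsh : pvShape Nn Mm t)
    (a b : Nat) (ha : a ≤ Nn) (hb : b ≤ Mm) (v : Int) :
    pvTGet (pvTSet t (a : Int) (b : Int) v) (a : Int) (b : Int) = v := by
  rw [pvTSet_cast, pvTGet_cast]
  rw [getD_set_self _ _ _ _ (by have := hsh.1; omega)]
  exact getD_set_self _ _ _ _ (by rw [hsh.2 a ha]; omega)

theorem tget_tset_ne (t : List (List Int)) (a b a' b' : Nat) (h : a ≠ a' ∨ b ≠ b') (v : Int) :
    pvTGet (pvTSet t (a : Int) (b : Int) v) (a' : Int) (b' : Int) = pvTGet t (a' : Int) (b' : Int) := by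
  rw [pvTSet_cast, pvTGet_cast, pvTGet_cast]
  rcases h with h | h
  · rw [getD_set_ne _ _ _ _ _ h]
  · by_cases ha : a = a'
    · subst ha
      by_cases hlen : a < t.length
      · rw [getD_set_self _ _ _ _ hlen, getD_set_ne _ _ _ _ _ h]
      · rw [List.set_eq_of_length_le (by omega)]
    · rw [getD_set_ne _ _ _ _ _ ha]

theorem shape_tset (Nn Mm : Nat) (t : List (List Int)) (hsh : pvShape Nn Mm t)
    (a b : Nat) (v : Int) : pvShape Nn Mm (pvTSet t (a : Int) (b : Int) v) := by
  rw [pvTSet_cast]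
  refine ⟨by simp [hsh.1], fun i hi => ?_⟩
  by_cases hia : i = a
  · subst hia
    rw [getD_set_self _ _ _ _ (by have := hsh.1; omega)]
    rw [List.length_set]
    exact hsh.2 i hi
  · rw [getD_set_ne _ _ _ _ _ (by omega)]
    exact hsh.2 i hi

theorem pvJInv_write (Nn Mm a j : Nat) (_ha : a ≤ Nn) (_hj : j ≤ min a Mm)
    (t t2 : List (List Int)) (h : pvJInv Nn Mm a (j + 1) t)
    (hsh2 : pvShape Nn Mm t2)
    (hval : pvTGet t2 (a : Int) (j : Int) = pvF Nn Mm a j)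
    (hother : ∀ a' b : Nat, (a' ≠ a ∨ b ≠ j) → pvTGet t2 (a' : Int) (b : Int) = pvTGet t (a' : Int) (b : Int)) :
    pvJInv Nn Mm a j t2 := by
  obtain ⟨hsh, habove, hbelow, hdone, hrest⟩ := h
  refine ⟨hsh2, ?_, ?_, ?_, ?_⟩
  · intro a' b h1 h2 h3
    rw [hother a' b (Or.inl (by omega))]
    exact habove a' b h1 h2 h3
  · intro a' b h1 h2
    rw [hother a' b (Or.inl (by omega))]
    exact hbelow a' b h1 h2
  · intro b h1 h2
    by_cases hbj : b = j
    · subst hbj; exact hval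
    · rw [hother a b (Or.inr hbj)]
      exact hdone b (by omega) h2
  · intro b h1 h2
    rw [hother a b (Or.inr (by omega))]
    exact hrest b (by omega) h2

theorem pv_step (Nn Mm a j : Nat) (hMN : Mm ≤ Nn) (ha : a ≤ Nn) (hj : j ≤ min a Mm)
    (t : List (List Int)) (h : pvJInv Nn Mm a (j + 1) t) :
    pvJInv Nn Mm a j (pvInnerStep (Nn : Int) (Mm : Int) (a : Int) t (j : Int)) := by
  obtain ⟨hsh, habove, hbelow, hdone, hrest⟩ := h
  by_cases hEq : a = Nn
  · have hcst : (a : Int) = (Nn : Int) := by exact_mod_cast hEq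
    rw [pvInnerStep, if_pos hcst]
    refine pvJInv_write _ _ _ _ ha hj t _ ⟨hsh, habove, hbelow, hdone, hrest⟩
      (shape_tset _ _ _ hsh _ _ _) ?_ ?_
    · rw [tget_tset_self _ _ _ hsh _ _ ha (by omega), hEq]
      exact (pvF_base Nn Mm j hMN (by omega)).symm
    · intro a' b hne
      exact tget_tset_ne t _ _ _ _ (by tauto) _
  · have hlt : a < Nn := by omega
    have hcast : (a : Int) ≠ (Nn : Int) := by exact_mod_cast hEq
    rw [pvInnerStep, if_neg hcast]
    have hz : pvTGet t (a : Int) (j : Int) = 0 := hrest j (by omega) (by omega)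
    have hup : pvTGet t ((a : Int) + 1) (j : Int) = pvF Nn Mm (a + 1) j := by
      have e : ((a : Int) + 1) = ((a + 1 : Nat) : Int) := by push_cast; ring
      rw [e]
      exact habove (a + 1) j (by omega) (by omega) (by omega)
    have hv1 : pvTGet t (a : Int) (j : Int) + pvTGet t ((a : Int) + 1) (j : Int) = pvF Nn Mm (a + 1) j := by
      rw [hz, hup]; ring
    set v1 := pvTGet t (a : Int) (j : Int) + pvTGet t ((a : Int) + 1) (j : Int) with hv1def
    set t1 := pvTSet t (a : Int) (j : Int) v1 with ht1
    have hsh1 : pvShape Nn Mm t1 := shape_tset _ _ _ hsh _ _ _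
    by_cases hc : (j : Int) + 1 ≤ (Mm : Int) ∧ (j : Int) + 1 ≤ (a : Int)
    · rw [if_pos hc]
      have hcM : j + 1 ≤ Mm := by exact_mod_cast hc.1
      have hca : j + 1 ≤ a := by exact_mod_cast hc.2
      have hg1 : pvTGet t1 (a : Int) (j : Int) = v1 :=
        tget_tset_self _ _ _ hsh _ _ ha (by omega) _
      have hg2 : pvTGet t1 (a : Int) ((j : Int) + 1) = pvF Nn Mm a (j + 1) := by
        have e : ((j : Int) + 1) = ((j + 1 : Nat) : Int) := by push_cast; ring
        rw [e, ht1, tget_tset_ne t _ _ _ _ (Or.inr (by omega)) _]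
        exact hdone (j + 1) (by omega) (by omega)
      refine pvJInv_write _ _ _ _ ha hj t _ ⟨hsh, habove, hbelow, hdone, hrest⟩
        (shape_tset _ _ _ hsh1 _ _ _) ?_ ?_
      · rw [tget_tset_self _ _ _ hsh1 _ _ ha (by omega)]
        rw [hg1, hg2, hv1]
        exact (pvF_R1 Nn Mm a j hlt hcM hca).symm
      · intro a' b hne
        rw [tget_tset_ne t1 _ _ _ _ (by tauto) _, ht1,
          tget_tset_ne t _ _ _ _ (by tauto) _]
    · rw [if_neg hc]
      have hor : j = Mm ∨ (j = a ∧ a < Mm) := by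
        rcases not_and_or.mp hc with h1 | h1
        · left; omega
        · by_cases h2 : j = Mm
          · exact Or.inl h2
          · right; omega
      refine pvJInv_write _ _ _ _ ha hj t _ ⟨hsh, habove, hbelow, hdone, hrest⟩ hsh1 ?_ ?_
      · rw [ht1, tget_tset_self _ _ _ hsh _ _ ha (by omega), hv1]
        rcases hor with h1 | ⟨h1, h2⟩
        · rw [h1]
          exact (pvF_R2_top Nn Mm a (by omega) hlt).symm
        · rw [h1]
          exact (pvF_R2_diag Nn Mm a hlt h2).symm
      · intro a' b hne
        exact tget_tset_ne t _ _ _ _ (by tauto) _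

theorem inner_fold (Nn Mm a : Nat) (hMN : Mm ≤ Nn) (ha : a ≤ Nn) :
    ∀ (j : Nat), j ≤ min a Mm + 1 → ∀ t, pvJInv Nn Mm a j t →
    pvJInv Nn Mm a 0
      ((PySem.List.pyRange ((j : Int) - 1) (-1) (-1)).foldl (pvInnerStep (Nn : Int) (Mm : Int) (a : Int)) t) := by
  intro j
  induction j with
  | zero =>
    intro _ t h
    rw [PySem.List.pyRange_neg_one_eq_nil (by omega)]
    exact h
  | succ j ih =>
    intro hj t h
    have e : ((j + 1 : Nat) : Int) - 1 = (j : Int) := by push_cast; ring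
    rw [e, PySem.List.pyRange_neg_one_cons (by omega), List.foldl_cons]
    exact ih (by omega) _ (pv_step Nn Mm a j hMN ha (by omega) t h)

theorem outer_fold (Nn Mm : Nat) (hMN : Mm ≤ Nn) :
    ∀ (k : Nat), k ≤ Nn + 1 → ∀ t, pvInv Nn Mm k t →
    pvInv Nn Mm 0
      (((PySem.List.pyRange ((k : Int) - 1) (-1) (-1)).foldl
        (fun t a => (PySem.List.pyRange (min a (Mm : Int)) (-1) (-1)).foldl (pvInnerStep (Nn : Int) (Mm : Int) a) t) t)) := by
  intro k
  induction k with
  | zero =>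
    intro _ t h
    rw [PySem.List.pyRange_neg_one_eq_nil (by omega)]
    exact h
  | succ a ih =>
    intro hk t h
    have e : ((a + 1 : Nat) : Int) - 1 = (a : Int) := by push_cast; ring
    rw [e, PySem.List.pyRange_neg_one_cons (by omega), List.foldl_cons]
    apply ih (by omega)
    -- one outer iteration: row a is filled by the inner fold
    obtain ⟨hsh, hcorrect, hzero⟩ := h
    have hJ : pvJInv Nn Mm a (min a Mm + 1) t := by
      refine ⟨hsh, ?_, ?_, ?_, ?_⟩
      · intro a' b h1 h2 h3
        exact hcorrect a' b (by omega) h2 h3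
      · intro a' b h1 h2
        exact hzero a' b (by omega) h2
      · intro b h1 h2
        omega
      · intro b _ h2
        exact hzero a b (by omega) h2
    have e2 : (min (a : Int) (Mm : Int)) = ((min a Mm + 1 : Nat) : Int) - 1 := by
      push_cast; omega
    rw [e2]
    have hres := inner_fold Nn Mm a hMN (by omega) (min a Mm + 1) (by omega) t hJ
    obtain ⟨hsh', habove', hbelow', hdone', hrest'⟩ := hres
    refine ⟨hsh', ?_, ?_⟩
    · intro a' b h1 h2 h3
      by_cases haa : a' = a
      · subst haa
        exact hdone' b (by omega) h3
      · exact habove' a' b (by omega) h2 h3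
    · intro a' b h1 h2
      exact hbelow' a' b (by omega) h2

theorem getD_map_zero (l : List Int) (b : Nat) :
    ((l.map (fun _ => (0 : Int))).getD b 0) = 0 := by
  rcases lt_or_ge b l.length with h | h
  · rw [List.getD_eq_getElem _ _ (by simpa using h)]
    simp
  · rw [List.getD_eq_default _ _ (by simpa using h)]

theorem main_dp_eq (n m : Int) (h0 : 0 ≤ m) (hmn : m ≤ n) :
    bertrand_ballot_dp n m = pvF n.toNat m.toNat 0 0 := by
  obtain ⟨Mm, rfl⟩ : ∃ Mm : Nat, m = (Mm : Int) := ⟨m.toNat, by omega⟩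
  obtain ⟨Nn, rfl⟩ : ∃ Nn : Nat, (n : Int) = (Nn : Int) := ⟨n.toNat, by omega⟩
  have hMN : Mm ≤ Nn := by exact_mod_cast hmn
  rw [bertrand_ballot_dp, if_neg (by omega)]
  simp only [Int.toNat_natCast]
  -- the initial all-zero table satisfies the invariant at level Nn+1
  set opt0 := (PySem.List.pyRange 0 ((Nn : Int) + 1) 1).map
    (fun _ => (PySem.List.pyRange 0 ((Mm : Int) + 1) 1).map (fun _ => (0 : Int))) with hopt0
  have hlen : opt0.length = Nn + 1 := by
    rw [hopt0, List.length_map, PySem.List.length_pyRange_one]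
    omega
  have hrow : ∀ i : Nat, i ≤ Nn → (opt0.getD i []).length = Mm + 1 := by
    intro i hi
    rw [hopt0, List.getD_eq_getElem _ _ (by rw [List.length_map, PySem.List.length_pyRange_one]; omega)]
    rw [List.getElem_map, List.length_map, PySem.List.length_pyRange_one]
    omega
  have hzero : ∀ a b : Nat, pvTGet opt0 (a : Int) (b : Int) = 0 := by
    intro a b
    rw [pvTGet_cast]
    rcases lt_or_ge a opt0.length with h | h
    · have : opt0.getD a [] = (PySem.List.pyRange 0 ((Mm : Int) + 1) 1).map (fun _ => (0 : Int)) := by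
        rw [hopt0, List.getD_eq_getElem _ _ (by simpa [hopt0] using h), List.getElem_map]
      rw [this, getD_map_zero]
    · have h2 : opt0.getD a [] = [] := List.getD_eq_default _ _ h
      rw [h2]
      rfl
  have hInv : pvInv Nn Mm (Nn + 1) opt0 := by
    refine ⟨⟨hlen, hrow⟩, ?_, ?_⟩
    · intro a b h1 h2 _
      omega
    · intro a b _ _
      exact hzero a b
  have e : (Nn : Int) = ((Nn + 1 : Nat) : Int) - 1 := by push_cast; ring
  rw [e]
  have hres := outer_fold Nn Mm hMN (Nn + 1) (by omega) opt0 hInv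
  obtain ⟨_, hcorrect, _⟩ := hres
  have := hcorrect 0 0 (by omega) (by omega) (by omega)
  simpa using this


-- ===== VERDICT (by name: the statement is the Claim_ definition above) =====
theorem bertrand_ballot_dp_spec : Claim_equal_bertrand_ballot_dp := by
  intro n m _ hpre
  obtain ⟨h0, hmn⟩ := hpre
  show bertrand_ballot_dp n m = bertrand_ballot_dp_alt n m
  rw [main_dp_eq n m h0 hmn]
  unfold bertrand_ballot_dp_alt pvF
  rw [if_neg (by omega), pvComb_eq _ _ (by omega), pvComb_eq _ _ (by omega)]
  have h1 : (n + m).toNat = (n.toNat - 0) + (m.toNat - 0) := by omega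
  have h3 : (m.toNat : Int) = m := by omega
  rw [h1]
  norm_num [h3]
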